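-- pv_equiv track=rewrite | github.com/AlexYM07/algoritmos_python2 | 12_sumas_pares_impares_anidada_2.py | sumas_impares_pares
-- ===== SOURCE A (Python) =====
-- def sumas_impares_pares(lista_anidada):
--     lista_final = [] # aqui guardamos los resultados de cada sublista
--
--     for sublista in lista_anidada:
--         suma_pares = 0
--         suma_impares = 0
--
--         for numero in sublista:
--             if numero % 2 == 0:
--                 suma_pares += numero
--             else:
--                 suma_impares += numero
--
--         #aqui unimos las dos sumas en un diccionario
--         union = {"pares": suma_pares, "impares": suma_impares}
--
--         # lo agregamos a la lista de resultados
--         lista_final.append(union)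
--
--     return lista_final
-- ===== SOURCE B (Python) =====
-- def sumas_impares_pares(lista_anidada):
--     # Recursive: head sublist handled via total-sum identity (pares = total - impares),
--     # so evens are never filtered; tail handled by recursion.
--     if not lista_anidada:
--         return []
--     cabeza = lista_anidada[0]
--     total = sum(cabeza)
--     impares = sum(x for x in cabeza if x % 2)
--     return [{"pares": total - impares, "impares": impares}] + sumas_impares_pares(lista_anidada[1:])
-- ===== Notes on version B (the rewrite author's own statement) =====
-- stated objective: alternative
-- what changed: Replaced the iterative classifying accumulator with structural recursion that computes each dict from the arithmetic identity pares = sum(sublist) - impares, so even numbers are never separated out.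
import Mathlib
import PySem

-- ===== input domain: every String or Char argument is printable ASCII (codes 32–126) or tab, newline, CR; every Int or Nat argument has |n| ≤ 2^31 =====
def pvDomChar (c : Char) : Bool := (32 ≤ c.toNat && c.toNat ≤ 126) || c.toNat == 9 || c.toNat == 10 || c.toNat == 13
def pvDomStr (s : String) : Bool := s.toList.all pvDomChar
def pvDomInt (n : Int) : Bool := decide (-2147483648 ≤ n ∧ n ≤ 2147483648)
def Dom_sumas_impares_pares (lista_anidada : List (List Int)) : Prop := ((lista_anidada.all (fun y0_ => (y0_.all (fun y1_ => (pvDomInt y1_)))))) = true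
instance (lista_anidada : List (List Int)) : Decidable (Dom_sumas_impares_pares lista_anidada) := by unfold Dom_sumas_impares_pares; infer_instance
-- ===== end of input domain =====

-- B is a structural recursion computing each dict via pares = sum - impares (no even filter); same values as A.

-- ===== PORT A =====
def sumas_impares_pares (lista_anidada : List (List Int)) : List (List (String × Int)) :=
  lista_anidada.foldl
    (fun lista_final sublista =>
      let sums := sublista.foldl
        (fun (s : Int × Int) numero =>
          if PySem.Int.mod numero 2 = 0 then (s.1 + numero, s.2) else (s.1, s.2 + numero))
        (0, 0)
      lista_final ++ [[("pares", sums.1), ("impares", sums.2)]])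
    []

-- ===== PORT B =====
def sumas_impares_pares_alt : List (List Int) → List (List (String × Int))
  | [] => []
  | cabeza :: resto =>
    let total := cabeza.sum
    let impares := (cabeza.filter (fun x => PySem.Int.mod x 2 ≠ 0)).sum
    [("pares", total - impares), ("impares", impares)] :: sumas_impares_pares_alt resto

-- ===== PRECONDITION & SPEC =====
def Spec_sumas_impares_pares (lista_anidada : List (List Int)) (out : List (List (String × Int))) : Prop := out = sumas_impares_pares_alt lista_anidada
instance (lista_anidada : List (List Int)) (out : List (List (String × Int))) : Decidable (Spec_sumas_impares_pares lista_anidada out) := by unfold Spec_sumas_impares_pares; infer_instance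

-- ===== CLAIM (what is proved, stated in full; the proofs are below) =====
def Claim_equal_sumas_impares_pares : Prop := ∀ (lista_anidada : List (List Int)), Dom_sumas_impares_pares lista_anidada → Spec_sumas_impares_pares lista_anidada (sumas_impares_pares lista_anidada)

-- ===== LEMMAS AND PROOFS =====
-- A's inner classifying loop, generalized over its accumulator: evens part is total minus odds.
lemma inner_loop_eq (sublista : List Int) (s : Int × Int) :
    sublista.foldl
      (fun (s : Int × Int) numero =>
        if PySem.Int.mod numero 2 = 0 then (s.1 + numero, s.2) else (s.1, s.2 + numero)) s
    = (s.1 + (sublista.sum - (sublista.filter (fun x => PySem.Int.mod x 2 ≠ 0)).sum),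
       s.2 + (sublista.filter (fun x => PySem.Int.mod x 2 ≠ 0)).sum) := by
  induction sublista generalizing s with
  | nil => simp
  | cons n t ih =>
    simp only [List.foldl_cons]
    by_cases h : PySem.Int.mod n 2 = 0
    · rw [if_pos h, ih]
      simp only [List.filter_cons, h, List.sum_cons, ne_eq, decide_not, decide_true,
        Bool.not_true, Bool.false_eq_true, if_false]
      exact Prod.ext (by ring) (by ring)
    · rw [if_neg h, ih]
      simp only [List.filter_cons, h, List.sum_cons, ne_eq, decide_not, decide_false,
        Bool.not_false, if_true]
      exact Prod.ext (by ring) (by ring)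

lemma outer_eq (lista_anidada : List (List Int)) (acc : List (List (String × Int))) :
    lista_anidada.foldl
      (fun lista_final sublista =>
        let sums := sublista.foldl
          (fun (s : Int × Int) numero =>
            if PySem.Int.mod numero 2 = 0 then (s.1 + numero, s.2) else (s.1, s.2 + numero))
          (0, 0)
        lista_final ++ [[("pares", sums.1), ("impares", sums.2)]]) acc
    = acc ++ sumas_impares_pares_alt lista_anidada := by
  induction lista_anidada generalizing acc with
  | nil => simp [sumas_impares_pares_alt]
  | cons h t ih =>
    rw [List.foldl_cons, ih]
    simp only [inner_loop_eq, zero_add]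
    rw [sumas_impares_pares_alt]
    simp

-- ===== VERDICT (by name: the statement is the Claim_ definition above) =====
theorem sumas_impares_pares_spec : Claim_equal_sumas_impares_pares := by
  intro l _
  show sumas_impares_pares l = _
  simpa [sumas_impares_pares] using outer_eq l []
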